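-- pv_equiv track=rewrite | github.com/xiaohuguo2023/pytorch | torch/_inductor/comm_analysis.py | _log2i
-- ===== SOURCE A (Python) =====
-- def _log2i(n: int) -> int:
--     """Integer log2, matching NCCL's log2i (floor of log2)."""
--     if n <= 0:
--         return 0
--     r = 0
--     while n > 1:
--         n >>= 1
--         r += 1
--     return r
-- ===== SOURCE B (Python) =====
-- def _log2i(n: int) -> int:
--     """Integer log2, matching NCCL's log2i (floor of log2)."""
--     if n <= 0:
--         return 0
--     return n.bit_length() - 1
-- ===== Notes on version B (the rewrite author's own statement) =====
-- stated objective: idiomatic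
-- what changed: Replaced the shift-and-count loop with the closed-form n.bit_length() - 1, keeping the n <= 0 guard.
import Mathlib
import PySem

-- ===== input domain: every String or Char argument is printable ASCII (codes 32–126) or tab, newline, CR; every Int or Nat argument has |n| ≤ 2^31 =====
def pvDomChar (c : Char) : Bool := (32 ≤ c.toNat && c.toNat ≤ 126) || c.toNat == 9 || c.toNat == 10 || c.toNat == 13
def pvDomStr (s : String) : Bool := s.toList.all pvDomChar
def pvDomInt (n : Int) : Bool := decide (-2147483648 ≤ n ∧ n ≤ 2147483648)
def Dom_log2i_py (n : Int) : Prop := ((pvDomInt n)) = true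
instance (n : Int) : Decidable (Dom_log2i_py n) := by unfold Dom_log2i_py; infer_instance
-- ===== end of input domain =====

-- ===== PORT A =====
-- loop: while n > 1: n >>= 1; r += 1   (n is positive here, so >> 1 is halving)
def log2iLoop (n : Nat) (r : Int) : Int :=
  if h : n > 1 then log2iLoop (n / 2) (r + 1) else r
  decreasing_by exact Nat.div_lt_self (by omega) (by omega)

def log2i_py (n : Int) : Int :=
  if n ≤ 0 then 0 else log2iLoop n.toNat 0

-- ===== PORT B =====
-- bit_length of a positive int = Nat.size
def log2i_py_alt (n : Int) : Int :=
  if n ≤ 0 then 0 else (Nat.size n.toNat : Int) - 1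

-- ===== PRECONDITION & SPEC =====
def Spec_log2i_py (n : Int) (out : Int) : Prop := out = log2i_py_alt n
instance (n : Int) (out : Int) : Decidable (Spec_log2i_py n out) := by unfold Spec_log2i_py; infer_instance

-- ===== CLAIM (what is proved, stated in full; the proofs are below) =====
def Claim_equal_log2i_py : Prop := ∀ (n : Int), Dom_log2i_py n → Spec_log2i_py n (log2i_py n)

-- ===== LEMMAS AND PROOFS =====

-- ===== VERDICT (by name: the statement is the Claim_ definition above) =====
theorem size_half (n : Nat) (h : n ≠ 0) : Nat.size n = Nat.size (n / 2) + 1 := by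
  have hb : Nat.bit (decide (n % 2 = 1)) (n / 2) = n := by
    simp [Nat.bit]
    rcases Nat.mod_two_eq_zero_or_one n with h2 | h2 <;> simp [h2] <;> omega
  have := Nat.size_bit (b := decide (n % 2 = 1)) (n := n / 2) (by rw [hb]; exact h)
  rw [hb] at this
  omega

theorem log2iLoop_size (n : Nat) (r : Int) (h : 1 ≤ n) :
    log2iLoop n r = r + (Nat.size n : Int) - 1 := by
  induction n using Nat.strong_induction_on generalizing r with
  | _ n ih =>
    rw [log2iLoop]
    by_cases h2 : n > 1
    · rw [dif_pos h2, ih (n / 2) (Nat.div_lt_self (by omega) (by omega)) (r + 1) (by omega),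
        size_half n (by omega)]
      push_cast
      ring
    · rw [dif_neg h2]
      have : n = 1 := by omega
      subst this
      simp [Nat.size_one]

theorem log2i_py_spec : Claim_equal_log2i_py := by
  intro n _
  unfold Spec_log2i_py log2i_py log2i_py_alt
  by_cases h : n ≤ 0
  · simp [h]
  · rw [if_neg h, if_neg h, log2iLoop_size n.toNat 0 (by omega)]
    ring
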